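-- pv_equiv track=rewrite | github.com/LLNL/axom | src/axom/mir/scripts/clip_table_generator_hexahedron.py | isHexCaseSix
-- ===== SOURCE A (Python) =====
-- def fourVertsOnSameFace( vertices ):
--     faceOne = [0, 1, 2, 3] # bottom face
--     faceTwo = [4, 5, 6, 7] # top face
--     faceThree = [1, 2, 5, 6] # right face
--     faceFour = [0, 3, 4, 7] # left face
--     faceFive = [0, 1, 4, 5] # front face
--     faceSix = [2, 3, 6, 7] # back face
--
--     if vertices[0] in faceOne and vertices[1] in faceOne and vertices[2] in faceOne and vertices[3] in faceOne:
--         return True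
--     elif vertices[0] in faceTwo and vertices[1] in faceTwo and vertices[2] in faceTwo and vertices[3] in faceTwo:
--         return True
--     elif vertices[0] in faceThree and vertices[1] in faceThree and vertices[2] in faceThree and vertices[3] in faceThree:
--         return True
--     elif vertices[0] in faceFour and vertices[1] in faceFour and vertices[2] in faceFour and vertices[3] in faceFour:
--         return True
--     elif vertices[0] in faceFive and vertices[1] in faceFive and vertices[2] in faceFive and vertices[3] in faceFive:
--         return True
--     elif vertices[0] in faceSix and vertices[1] in faceSix and vertices[2] in faceSix and vertices[3] in faceSix:
--         return True
--     else:
--         return False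
--
-- def isHexCaseSix( onBits, offBits ):
--     if len( onBits ) == 3 or len( offBits ) == 3:
--         if len( onBits ) == 3:
--             clipBits = onBits
--             nonClipBits = offBits
--         else:
--             clipBits = offBits
--             nonClipBits = onBits
--
--         # Check if the three "on" bits are on the same face.
--         v0 = clipBits[0]
--         v1 = clipBits[1]
--         v2 = clipBits[2]
--         for offVertex in nonClipBits:
--             faceVertices = [v0, v1, v2]
--             faceVertices.append( offVertex )
--             if fourVertsOnSameFace( faceVertices ):
--                 return True
--
--         return False
--
--     else:
--         return False
-- ===== SOURCE B (Python) =====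
-- def _hexCoords(v):
--     # Hex vertex v in 0..7 has coordinates x,y,z with the standard numbering:
--     # z = v // 4; within a level, r = v % 4 walks the square 0->(0,0),1->(1,0),2->(1,1),3->(0,1).
--     if 0 <= v < 8:
--         q = v // 4
--         r = v % 4
--         return (1 if r == 1 or r == 2 else 0, 1 if r >= 2 else 0, q)
--     return None
--
-- def isHexCaseSix(onBits, offBits):
--     if len(onBits) == 3:
--         clip, nonclip = onBits, offBits
--     elif len(offBits) == 3:
--         clip, nonclip = offBits, onBits
--     else:
--         return False
--     cs = [_hexCoords(v) for v in clip]
--     if None in cs: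
--         return False
--     c0, c1, c2 = cs
--     ns = [c for c in map(_hexCoords, nonclip) if c is not None]
--     # Each face of the hex is a coordinate hyperplane (x, y or z fixed to 0 or 1),
--     # so four vertices share a face iff they agree on some coordinate axis.
--     for axis in range(3):
--         b = c0[axis]
--         if c1[axis] == b and c2[axis] == b and any(n[axis] == b for n in ns):
--             return True
--     return False
-- ===== Notes on version B (the rewrite author's own statement) =====
-- stated objective: alternative
-- what changed: B replaces A's six explicit face lists and per-off-vertex helper scan with an arithmetic encoding: each vertex 0..7 is mapped to its (x,y,z) bit coordinates via //4 and %4, and since every hex face is a coordinate hyperplane, B just tests whether the three clip vertices and some non-clip vertex agree on one of the three coordinate axes.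
import Mathlib
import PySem

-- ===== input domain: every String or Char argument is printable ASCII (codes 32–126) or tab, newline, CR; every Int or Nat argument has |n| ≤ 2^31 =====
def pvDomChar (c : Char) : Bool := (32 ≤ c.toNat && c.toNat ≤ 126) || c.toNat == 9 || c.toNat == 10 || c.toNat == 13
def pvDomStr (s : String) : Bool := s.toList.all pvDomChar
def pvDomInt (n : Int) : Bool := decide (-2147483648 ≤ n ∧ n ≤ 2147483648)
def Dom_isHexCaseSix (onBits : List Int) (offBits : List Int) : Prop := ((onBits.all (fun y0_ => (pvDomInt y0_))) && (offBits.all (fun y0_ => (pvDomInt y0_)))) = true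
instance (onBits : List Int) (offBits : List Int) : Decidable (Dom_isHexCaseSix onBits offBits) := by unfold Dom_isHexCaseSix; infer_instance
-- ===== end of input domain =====

-- B replaces A's six face lists and per-off-vertex helper scan by an arithmetic (x,y,z)
-- bit-coordinate encoding of the hex vertices: faces are coordinate hyperplanes, so the
-- test becomes "all three clip vertices and some non-clip vertex agree on one axis"
-- (objective: alternative algorithm of similar cost).


-- ===== PORT A =====
-- helper fourVertsOnSameFace: Python indexes vertices[0..3]; it is only ever called with a
-- four-element list, so the port pattern-matches on that shape (the '_' arm is Python's
-- unreachable IndexError region).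
def fourVertsOnSameFace (vertices : List Int) : Bool :=
  let faceOne : List Int := [0, 1, 2, 3]
  let faceTwo : List Int := [4, 5, 6, 7]
  let faceThree : List Int := [1, 2, 5, 6]
  let faceFour : List Int := [0, 3, 4, 7]
  let faceFive : List Int := [0, 1, 4, 5]
  let faceSix : List Int := [2, 3, 6, 7]
  match vertices with
  | [a, b, c, d] =>
    if faceOne.contains a && faceOne.contains b && faceOne.contains c && faceOne.contains d then true
    else if faceTwo.contains a && faceTwo.contains b && faceTwo.contains c && faceTwo.contains d then true
    else if faceThree.contains a && faceThree.contains b && faceThree.contains c && faceThree.contains d then true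
    else if faceFour.contains a && faceFour.contains b && faceFour.contains c && faceFour.contains d then true
    else if faceFive.contains a && faceFive.contains b && faceFive.contains c && faceFive.contains d then true
    else if faceSix.contains a && faceSix.contains b && faceSix.contains c && faceSix.contains d then true
    else false
  | _ => false

-- A's 'for offVertex in nonClipBits: … return True / return False' loop
def isHexCaseSixLoop (v0 v1 v2 : Int) : List Int → Bool
  | [] => false
  | offVertex :: rest =>
    if fourVertsOnSameFace [v0, v1, v2, offVertex] then true
    else isHexCaseSixLoop v0 v1 v2 rest

def isHexCaseSix (onBits : List Int) (offBits : List Int) : Bool :=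
  if onBits.length == 3 || offBits.length == 3 then
    let clipBits := if onBits.length == 3 then onBits else offBits
    let nonClipBits := if onBits.length == 3 then offBits else onBits
    -- clipBits[0], clipBits[1], clipBits[2]: under the guard clipBits has exactly 3 elements,
    -- so the match is Python's in-range indexing (the '_' arm is unreachable).
    match clipBits with
    | v0 :: v1 :: v2 :: _ => isHexCaseSixLoop v0 v1 v2 nonClipBits
    | _ => false
  else false

-- ===== PORT B =====
-- _hexCoords: (x, y, z) bit coordinates of a hex vertex, None outside 0..7
def hexCoords (v : Int) : Option (Int × Int × Int) :=
  if 0 ≤ v ∧ v < 8 then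
    let q := PySem.Int.floordiv v 4
    let r := PySem.Int.mod v 4
    some (if r = 1 ∨ r = 2 then 1 else 0, if 2 ≤ r then 1 else 0, q)
  else none

-- Python's tuple indexing c[axis] for axis in range(3)
def axisGet (c : Int × Int × Int) (axis : Int) : Int :=
  if axis = 0 then c.1 else if axis = 1 then c.2.1 else c.2.2

-- B's 'for axis in range(3): … return True / return False' loop
def altAxisLoop (c0 c1 c2 : Int × Int × Int) (ns : List (Int × Int × Int)) : List Int → Bool
  | [] => false
  | axis :: rest =>
    let b := axisGet c0 axis
    if axisGet c1 axis == b && axisGet c2 axis == b && ns.any (fun n => axisGet n axis == b) then true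
    else altAxisLoop c0 c1 c2 ns rest

-- body after clip/nonclip selection: cs = [_hexCoords(v) for v in clip]; 'None in cs' check and
-- the unpack c0, c1, c2 = cs are the match (clip always has length 3 at the call sites)
def isHexCaseSixAltBody (clip nonclip : List Int) : Bool :=
  match clip.map hexCoords with
  | [some c0, some c1, some c2] =>
    let ns := nonclip.filterMap hexCoords
    altAxisLoop c0 c1 c2 ns (PySem.List.pyRange 0 3 1)
  | _ => false

def isHexCaseSix_alt (onBits : List Int) (offBits : List Int) : Bool :=
  if onBits.length == 3 then
    isHexCaseSixAltBody onBits offBits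
  else if offBits.length == 3 then
    isHexCaseSixAltBody offBits onBits
  else
    false

-- ===== PRECONDITION & SPEC =====
def Spec_isHexCaseSix (onBits : List Int) (offBits : List Int) (out : Bool) : Prop := out = isHexCaseSix_alt onBits offBits
instance (onBits : List Int) (offBits : List Int) (out : Bool) : Decidable (Spec_isHexCaseSix onBits offBits out) := by unfold Spec_isHexCaseSix; infer_instance

-- ===== CLAIM (what is proved, stated in full; the proofs are below) =====
def Claim_equal_isHexCaseSix : Prop := ∀ (onBits : List Int) (offBits : List Int), Dom_isHexCaseSix onBits offBits → Spec_isHexCaseSix onBits offBits (isHexCaseSix onBits offBits)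

-- ===== LEMMAS AND PROOFS =====

-- the six faces with the axis and bit value they fix
def faceTable : List (List Int × Int × Int) :=
  [([0, 3, 4, 7], 0, 0), ([1, 2, 5, 6], 0, 1),
   ([0, 1, 4, 5], 1, 0), ([2, 3, 6, 7], 1, 1),
   ([0, 1, 2, 3], 2, 0), ([4, 5, 6, 7], 2, 1)]

theorem fourVerts_iff (a b c d : Int) :
    fourVertsOnSameFace [a, b, c, d] = true ↔
      ∃ t ∈ faceTable, a ∈ t.1 ∧ b ∈ t.1 ∧ c ∈ t.1 ∧ d ∈ t.1 := by
  unfold fourVertsOnSameFace faceTable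
  simp only [List.contains_eq_mem, Bool.and_eq_true, decide_eq_true_eq,
    List.mem_cons, List.not_mem_nil, or_false, exists_eq_or_imp, exists_eq_left]
  split_ifs <;> simp_all

theorem loop_iff (v0 v1 v2 : Int) (l : List Int) :
    isHexCaseSixLoop v0 v1 v2 l = true ↔
      ∃ x ∈ l, fourVertsOnSameFace [v0, v1, v2, x] = true := by
  induction l with
  | nil => simp [isHexCaseSixLoop]
  | cons a xs ih =>
    by_cases h : fourVertsOnSameFace [v0, v1, v2, a] = true <;>
      simp [isHexCaseSixLoop, h, ih]

theorem mem_face_iff (v : Int) (t : List Int × Int × Int) (ht : t ∈ faceTable) :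
    v ∈ t.1 ↔ ∃ c, hexCoords v = some c ∧ axisGet c t.2.1 = t.2.2 := by
  by_cases hr : 0 ≤ v ∧ v < 8
  · obtain ⟨h1, h2⟩ := hr
    fin_cases ht <;> (interval_cases v <;> simp [hexCoords, axisGet])
  · have hnone : hexCoords v = none := by simp [hexCoords, hr]
    simp only [hnone]
    fin_cases ht <;> simp <;> omega

theorem coords_bits (v : Int) (c : Int × Int × Int) (h : hexCoords v = some c) :
    (c.1 = 0 ∨ c.1 = 1) ∧ (c.2.1 = 0 ∨ c.2.1 = 1) ∧ (c.2.2 = 0 ∨ c.2.2 = 1) := by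
  unfold hexCoords at h
  split_ifs at h with hr
  obtain ⟨h1, h2⟩ := hr
  rw [Option.some.injEq] at h
  subst h
  interval_cases v <;> decide

theorem table_cover (axis bit : Int) (ha : axis = 0 ∨ axis = 1 ∨ axis = 2)
    (hb : bit = 0 ∨ bit = 1) : ∃ t ∈ faceTable, t.2.1 = axis ∧ t.2.2 = bit := by
  rcases ha with rfl | rfl | rfl <;> rcases hb with rfl | rfl
  · exact ⟨([0, 3, 4, 7], 0, 0), by decide, rfl, rfl⟩
  · exact ⟨([1, 2, 5, 6], 0, 1), by decide, rfl, rfl⟩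
  · exact ⟨([0, 1, 4, 5], 1, 0), by decide, rfl, rfl⟩
  · exact ⟨([2, 3, 6, 7], 1, 1), by decide, rfl, rfl⟩
  · exact ⟨([0, 1, 2, 3], 2, 0), by decide, rfl, rfl⟩
  · exact ⟨([4, 5, 6, 7], 2, 1), by decide, rfl, rfl⟩

theorem table_axis (t : List Int × Int × Int) (ht : t ∈ faceTable) :
    t.2.1 = 0 ∨ t.2.1 = 1 ∨ t.2.1 = 2 := by fin_cases ht <;> simp

theorem altLoop_iff (c0 c1 c2 : Int × Int × Int) (ns : List (Int × Int × Int)) (l : List Int) :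
    altAxisLoop c0 c1 c2 ns l = true ↔
      ∃ axis ∈ l, axisGet c1 axis = axisGet c0 axis ∧ axisGet c2 axis = axisGet c0 axis ∧
        ∃ n ∈ ns, axisGet n axis = axisGet c0 axis := by
  induction l with
  | nil => simp [altAxisLoop]
  | cons a rest ih =>
    simp only [altAxisLoop]
    split_ifs with h
    · simp only [true_iff]
      simp only [Bool.and_eq_true, beq_iff_eq, List.any_eq_true] at h
      exact ⟨a, List.mem_cons_self, h.1.1, h.1.2, h.2⟩
    · simp only [Bool.and_eq_true, beq_iff_eq, List.any_eq_true] at h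
      push Not at h
      rw [ih]
      constructor
      · rintro ⟨axis, hm, hp⟩; exact ⟨axis, List.mem_cons_of_mem _ hm, hp⟩
      · rintro ⟨axis, hm, h1, h2, n, hn, h3⟩
        rcases List.mem_cons.mp hm with rfl | hm'
        · exact absurd h3 (h ⟨h1, h2⟩ n hn)
        · exact ⟨axis, hm', h1, h2, n, hn, h3⟩

-- main bridge on a length-3 clip list
theorem body_eq (v0 v1 v2 : Int) (nonclip : List Int) :
    isHexCaseSixLoop v0 v1 v2 nonclip = isHexCaseSixAltBody [v0, v1, v2] nonclip := by
  unfold isHexCaseSixAltBody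
  simp only [List.map]
  rcases h0 : hexCoords v0 with _ | c0
  · -- v0 outside 0..7: no face contains it, both sides false
    rw [Bool.eq_iff_iff, loop_iff]
    constructor
    · rintro ⟨x, _, hf⟩
      obtain ⟨t, ht, hm, _⟩ := (fourVerts_iff v0 v1 v2 x).mp hf
      obtain ⟨c, hc, _⟩ := (mem_face_iff v0 t ht).mp hm
      simp [h0] at hc
    · intro h; simp at h
  · rcases h1 : hexCoords v1 with _ | c1
    · rw [Bool.eq_iff_iff, loop_iff]
      constructor
      · rintro ⟨x, _, hf⟩
        obtain ⟨t, ht, _, hm, _⟩ := (fourVerts_iff v0 v1 v2 x).mp hf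
        obtain ⟨c, hc, _⟩ := (mem_face_iff v1 t ht).mp hm
        simp [h1] at hc
      · intro h; simp at h
    · rcases h2 : hexCoords v2 with _ | c2
      · rw [Bool.eq_iff_iff, loop_iff]
        constructor
        · rintro ⟨x, _, hf⟩
          obtain ⟨t, ht, _, _, hm, _⟩ := (fourVerts_iff v0 v1 v2 x).mp hf
          obtain ⟨c, hc, _⟩ := (mem_face_iff v2 t ht).mp hm
          simp [h2] at hc
        · intro h; simp at h
      · -- all three in range: compare the two characterizations
        simp only []
        rw [Bool.eq_iff_iff, loop_iff, altLoop_iff]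
        have hrange : PySem.List.pyRange 0 3 1 = [0, 1, 2] := by decide
        rw [hrange]
        constructor
        · rintro ⟨x, hx, hf⟩
          obtain ⟨t, ht, hm0, hm1, hm2, hmx⟩ := (fourVerts_iff v0 v1 v2 x).mp hf
          obtain ⟨c0', hc0, hb0⟩ := (mem_face_iff v0 t ht).mp hm0
          obtain ⟨c1', hc1, hb1⟩ := (mem_face_iff v1 t ht).mp hm1
          obtain ⟨c2', hc2, hb2⟩ := (mem_face_iff v2 t ht).mp hm2
          obtain ⟨cx, hcx, hbx⟩ := (mem_face_iff x t ht).mp hmx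
          rw [h0] at hc0; rw [h1] at hc1; rw [h2] at hc2
          obtain rfl := Option.some.inj hc0
          obtain rfl := Option.some.inj hc1
          obtain rfl := Option.some.inj hc2
          refine ⟨t.2.1, ?_, by rw [hb1, hb0], by rw [hb2, hb0], cx,
            List.mem_filterMap.mpr ⟨x, hx, hcx⟩, by rw [hbx, hb0]⟩
          rcases table_axis t ht with h | h | h <;> simp [h]
        · rintro ⟨axis, haxis, ha1, ha2, n, hn, han⟩
          obtain ⟨x, hx, hcx⟩ := List.mem_filterMap.mp hn
          have hax : axis = 0 ∨ axis = 1 ∨ axis = 2 := by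
            simp only [List.mem_cons, List.not_mem_nil, or_false] at haxis; tauto
          have hbit : axisGet c0 axis = 0 ∨ axisGet c0 axis = 1 := by
            have := coords_bits v0 c0 h0
            rcases hax with rfl | rfl | rfl <;> simp [axisGet] <;> tauto
          obtain ⟨t, ht, htax, htbit⟩ := table_cover axis (axisGet c0 axis) hax hbit
          refine ⟨x, hx, (fourVerts_iff v0 v1 v2 x).mpr ⟨t, ht, ?_, ?_, ?_, ?_⟩⟩
          · exact (mem_face_iff v0 t ht).mpr ⟨c0, h0, by rw [htax, htbit]⟩
          · exact (mem_face_iff v1 t ht).mpr ⟨c1, h1, by rw [htax, ha1, htbit]⟩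
          · exact (mem_face_iff v2 t ht).mpr ⟨c2, h2, by rw [htax, ha2, htbit]⟩
          · exact (mem_face_iff x t ht).mpr ⟨n, hcx, by rw [htax, han, htbit]⟩

-- ===== VERDICT (by name: the statement is the Claim_ definition above) =====
theorem isHexCaseSix_spec : Claim_equal_isHexCaseSix := by
  intro onBits offBits _
  unfold Spec_isHexCaseSix isHexCaseSix isHexCaseSix_alt
  by_cases hon : onBits.length = 3
  · obtain ⟨a, b, c, rfl⟩ := List.length_eq_three.mp hon
    simpa using body_eq a b c offBits
  · by_cases hoff : offBits.length = 3
    · obtain ⟨a, b, c, rfl⟩ := List.length_eq_three.mp hoff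
      simpa [hon] using body_eq a b c onBits
    · simp [hon, hoff]
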